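-- pv_equiv track=rewrite | github.com/jbsaeza/lucho | A2/A2.py | caminos_desde_todos
-- ===== SOURCE A (Python) =====
-- def caminos_desde_todos(grafo):
--     # BFS visto en clases
--     visited, queue = list(), [0]
--     while queue:
--         vertex = queue.pop(0)
--         if vertex not in visited:
--             visited.append(vertex)
--             for v in range(len(grafo[vertex])):
--                 if grafo[vertex][v] == 1 and v not in visited:
--                     queue.append(v)
--     return len(visited) == len(grafo)
-- ===== SOURCE B (Python) =====
-- def caminos_desde_todos(grafo):
--     # Round-based fixed-point saturation: repeatedly sweep all vertices, marking
--     # every neighbour of an already-reached vertex, until a full sweep changes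
--     # nothing; no queue at all.
--     n = len(grafo)
--     reached = [False] * n
--     reached[0] = True
--     changed = True
--     while changed:
--         changed = False
--         for u in range(n):
--             if reached[u]:
--                 row = grafo[u]
--                 for v in range(len(row)):
--                     if row[v] == 1 and not reached[v]:
--                         reached[v] = True
--                         changed = True
--     return all(reached)
-- ===== Notes on version B (the rewrite author's own statement) =====
-- stated objective: alternative
-- what changed: Replaced A's queue-based BFS (pop(0), visited-list scans, duplicate enqueues) by round-based fixed-point saturation: a boolean reachability array is repeatedly swept over all vertices, marking every neighbour of an already-reached vertex, until a full sweep changes nothing; there is no queue at all.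
-- outside the precondition, e.g. on caminos_desde_todos([[0, 0], [0, 0, 1]]): A returns False, B returns False
import Mathlib
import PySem

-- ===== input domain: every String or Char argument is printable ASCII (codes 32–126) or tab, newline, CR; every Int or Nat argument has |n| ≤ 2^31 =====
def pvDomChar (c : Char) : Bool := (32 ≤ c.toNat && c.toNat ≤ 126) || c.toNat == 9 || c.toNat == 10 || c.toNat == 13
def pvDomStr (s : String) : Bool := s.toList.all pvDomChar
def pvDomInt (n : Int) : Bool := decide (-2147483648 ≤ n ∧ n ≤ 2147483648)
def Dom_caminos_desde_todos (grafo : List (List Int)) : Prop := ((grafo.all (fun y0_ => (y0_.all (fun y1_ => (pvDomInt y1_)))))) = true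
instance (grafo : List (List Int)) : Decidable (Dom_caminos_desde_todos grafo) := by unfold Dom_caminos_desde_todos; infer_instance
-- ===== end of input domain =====

-- B replaces A's queue-based BFS by round-based fixed-point saturation over a boolean
-- reachability array (repeated full sweeps until stable): a different algorithm, no queue.


-- ===== PORT A =====
-- grafo[x] as the loops read it (the [] default is reached only where Python raises; Pre_ excludes that)
def pyRow (g : List (List Int)) (x : Int) : List Int := (PySem.List.pyGet? g x).getD []

-- A's while loop: pop the head, skip it if visited, else append it to visited and enqueue
-- every 1-column of its row that is not visited (duplicates in the queue allowed, like A).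
-- The fuel argument only totalizes the recursion; the proofs below show the initial fuel
-- is never exhausted on inputs satisfying Pre_.
def loopA (g : List (List Int)) : Nat → List Int → List Int → List Int
  | _, visited, [] => visited
  | 0, visited, _ :: _ => visited
  | fuel + 1, visited, vertex :: rest =>
    if vertex ∈ visited then loopA g fuel visited rest
    else
      let visited' := visited ++ [vertex]
      let row := pyRow g vertex
      loopA g fuel visited'
        (rest ++ (List.range row.length).filterMap
          (fun v => if row.getD v 0 = 1 ∧ (v : Int) ∉ visited' then some ((v : Int)) else none))

def caminos_desde_todos (grafo : List (List Int)) : Bool :=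
  (loopA grafo (grafo.length * (grafo.length + 1) + 1) [] [0]).length == grafo.length

-- ===== PORT B =====
-- one step of B's innermost loop: if row[v] == 1 and not reached[v]: reached[v] = True; changed = True
def stepB (row : List Int) (st : List Bool × Bool) (v : Nat) : List Bool × Bool :=
  if row.getD v 0 = 1 ∧ st.1.getD v false = false then (st.1.set v true, true) else st

-- for v in range(len(row)): …
def rowLoop (row : List Int) (st : List Bool × Bool) : List Bool × Bool :=
  (List.range row.length).foldl (stepB row) st

-- one full sweep u = 0 … n-1 (the body of the while loop, starting from changed = False)
def roundB (g : List (List Int)) (n : Nat) (r : List Bool) : List Bool × Bool :=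
  (List.range n).foldl
    (fun st u => if st.1.getD u false then rowLoop (pyRow g (u : Int)) st else st) (r, false)

-- while changed: … — the fuel argument only totalizes the recursion (each repeated round
-- marks at least one new vertex, proved below, so the initial fuel suffices inside Pre_)
def loopB (g : List (List Int)) (n : Nat) : Nat → List Bool → List Bool
  | 0, r => r
  | fuel + 1, r =>
    let p := roundB g n r
    if p.2 then loopB g n fuel p.1 else p.1

def caminos_desde_todos_alt (grafo : List (List Int)) : Bool :=
  (loopB grafo grafo.length grafo.length
    ((List.replicate grafo.length false).set 0 true)).all id

-- ===== PRECONDITION & SPEC =====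
-- Pre_ excludes the empty graph, on which A raises IndexError, and graphs in which some row
-- has a 1-entry at a column index ≥ len(grafo): whenever A reaches such a row it raises
-- IndexError (the exclusion is by row shape, so a few inputs whose bad row is unreachable —
-- where A still returns — are also excluded).
def Pre_caminos_desde_todos (grafo : List (List Int)) : Prop :=
  grafo ≠ [] ∧ ∀ row ∈ grafo, ∀ v ∈ List.range row.length, row.getD v 0 = 1 → v < grafo.length
instance (grafo : List (List Int)) : Decidable (Pre_caminos_desde_todos grafo) := by
  unfold Pre_caminos_desde_todos; infer_instance

def pvWitness_caminos_desde_todos : List (List Int) := [[0, 1], [1, 0]]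

def Spec_caminos_desde_todos (grafo : List (List Int)) (out : Bool) : Prop := out = caminos_desde_todos_alt grafo
instance (grafo : List (List Int)) (out : Bool) : Decidable (Spec_caminos_desde_todos grafo out) := by unfold Spec_caminos_desde_todos; infer_instance

-- ===== CLAIM (what is proved, stated in full; the proofs are below) =====
def Claim_equal_caminos_desde_todos : Prop := ∀ (grafo : List (List Int)), Dom_caminos_desde_todos grafo → Pre_caminos_desde_todos grafo → Spec_caminos_desde_todos grafo (caminos_desde_todos grafo)

-- ===== LEMMAS AND PROOFS =====

-- the directed edge relation both programs traverse
def EdgeG (g : List (List Int)) (u v : Nat) : Prop := (pyRow g (u : Int)).getD v 0 = 1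

inductive ReachG (g : List (List Int)) : Nat → Prop
  | zero : ReachG g 0
  | step {u v : Nat} : ReachG g u → EdgeG g u v → ReachG g v

lemma edge_lt {g : List (List Int)} (hpre : Pre_caminos_desde_todos g) {u v : Nat}
    (h : EdgeG g u v) : v < g.length := by
  unfold EdgeG pyRow at h
  cases hrow : PySem.List.pyGet? g (u : Int) with
  | none => rw [hrow] at h; simp at h
  | some row =>
    rw [hrow] at h
    simp only [Option.getD_some] at h
    have hmem : row ∈ g := PySem.List.mem_of_pyGet?_eq_some g hrow
    have hv : v < row.length := by
      by_contra hc
      rw [List.getD_eq_default _ _ (by omega)] at h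
      exact absurd h (by norm_num)
    exact hpre.2 row hmem v (List.mem_range.mpr hv) h

lemma reach_lt {g : List (List Int)} (hpre : Pre_caminos_desde_todos g) {u : Nat}
    (h : ReachG g u) : u < g.length := by
  induction h with
  | zero => exact List.length_pos_of_ne_nil hpre.1
  | step _ he _ => exact edge_lt hpre he

-- ---------- A side ----------

-- number of vertices of [0, n) not yet in V: the fuel accounting measure
def countM (n : Nat) (V : List Int) : Nat :=
  ((List.range n).filter (fun (v : Nat) => decide ((v : Int) ∉ V))).length

lemma countM_nil (n : Nat) : countM n [] = n := by simp [countM]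

lemma countM_append_new (n : Nat) (V : List Int) (x : Nat) (hx : x < n)
    (hxV : (x : Int) ∉ V) : countM n (V ++ [(x : Int)]) + 1 = countM n V := by
  unfold countM
  have hnd : ((List.range n).filter (fun (v : Nat) => decide ((v : Int) ∉ V))).Nodup :=
    (List.nodup_range).filter _
  have hmem : x ∈ (List.range n).filter (fun (v : Nat) => decide ((v : Int) ∉ V)) := by
    simp [List.mem_filter, hx, hxV]
  have hsplit : (List.range n).filter (fun (v : Nat) => decide ((v : Int) ∉ V ++ [(x : Int)]))
      = ((List.range n).filter (fun (v : Nat) => decide ((v : Int) ∉ V))).filter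
          (fun v => v != x) := by
    rw [List.filter_filter]
    apply List.filter_congr
    intro a _
    by_cases hax : a = x <;> by_cases haV : (a : Int) ∈ V <;> simp_all
  rw [hsplit, ← List.Nodup.erase_eq_filter hnd x, List.length_erase_of_mem hmem]
  have : 0 < ((List.range n).filter (fun (v : Nat) => decide ((v : Int) ∉ V))).length :=
    List.length_pos_of_mem hmem
  omega

-- the enqueue batch is the int-cast image of a filter over the column indices
lemma filterMap_if_eq_map_filter (c : Nat → Prop) [DecidablePred c] :
    ∀ l : List Nat, l.filterMap (fun v => if c v then some ((v : Int)) else none)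
      = (l.filter (fun v => decide (c v))).map (fun v => (v : Int)) := by
  intro l
  induction l with
  | nil => rfl
  | cons v l ih =>
    by_cases h : c v
    · simp [h, ih]
    · simp [h, ih]

-- a batch of pairwise-distinct column indices all < n has length ≤ n
lemma batch_len_le (g : List (List Int))
    (row : List Int) (hrow : ∀ v : Nat, row.getD v 0 = 1 → v < g.length) (V : List Int) :
    ((List.range row.length).filterMap
      (fun v => if row.getD v 0 = 1 ∧ (v : Int) ∉ V then some ((v : Int)) else none)).length
      ≤ g.length := by
  rw [filterMap_if_eq_map_filter (fun v => row.getD v 0 = 1 ∧ (v : Int) ∉ V)]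
  rw [List.length_map]
  have hsub : (List.range row.length).filter
      (fun v => decide (row.getD v 0 = 1 ∧ (v : Int) ∉ V)) ⊆ List.range g.length := by
    intro x hx
    simp only [List.mem_filter, decide_eq_true_eq] at hx
    exact List.mem_range.mpr (hrow x hx.2.1)
  have hnd : ((List.range row.length).filter
      (fun v => decide (row.getD v 0 = 1 ∧ (v : Int) ∉ V))).Nodup :=
    List.nodup_range.filter _
  have := (List.subperm_of_subset hnd hsub).length_le
  simpa using this

-- step equations for loopA
lemma loopA_nil (g : List (List Int)) (fa : Nat) (visited : List Int) :
    loopA g fa visited [] = visited := by cases fa <;> rfl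

lemma loopA_succ_mem (g : List (List Int)) (fa : Nat) (visited : List Int) (vertex : Int)
    (rest : List Int) (h : vertex ∈ visited) :
    loopA g (fa + 1) visited (vertex :: rest) = loopA g fa visited rest := by
  simp [loopA, h]

lemma loopA_succ_new (g : List (List Int)) (fa : Nat) (visited : List Int) (vertex : Int)
    (rest : List Int) (h : vertex ∉ visited) :
    loopA g (fa + 1) visited (vertex :: rest) =
      loopA g fa (visited ++ [vertex])
        (rest ++ (List.range (pyRow g vertex).length).filterMap
          (fun v => if (pyRow g vertex).getD v 0 = 1 ∧ (v : Int) ∉ visited ++ [vertex] then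
            some ((v : Int)) else none)) := by
  simp [loopA, h]

-- the BFS loop computes exactly the set of reachable vertices
lemma loopA_char {g : List (List Int)} (hpre : Pre_caminos_desde_todos g) :
    ∀ (fuel : Nat) (V Q : List Int),
      V.Nodup →
      (∀ x ∈ V, ∃ u : Nat, x = (u : Int) ∧ ReachG g u) →
      (∀ x ∈ Q, ∃ u : Nat, x = (u : Int) ∧ ReachG g u) →
      (∀ u v : Nat, (u : Int) ∈ V → EdgeG g u v → (v : Int) ∈ V ∨ (v : Int) ∈ Q) →
      ((0 : Int) ∈ V ++ Q) →
      countM g.length V * (g.length + 1) + Q.length ≤ fuel →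
      (loopA g fuel V Q).Nodup ∧
      (∀ x ∈ loopA g fuel V Q, ∃ u : Nat, x = (u : Int) ∧ ReachG g u) ∧
      (∀ u : Nat, ReachG g u → (u : Int) ∈ loopA g fuel V Q) := by
  intro fuel
  induction fuel with
  | zero =>
    intro V Q hnd hVs _ hclosed h0 hfuel
    have hcm := countM_nil g.length
    have : Q = [] := List.length_eq_zero_iff.mp (by
      by_contra hc
      have h1 : 1 ≤ Q.length := by omega
      omega)
    subst this
    rw [loopA_nil]
    refine ⟨hnd, hVs, ?_⟩
    intro u hu
    induction hu with
    | zero => simpa using h0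
    | step _ he ihr =>
      rcases hclosed _ _ ihr he with h | h
      · exact h
      · cases h
  | succ fuel ih =>
    intro V Q hnd hVs hQs hclosed h0 hfuel
    match Q with
    | [] =>
      rw [loopA_nil]
      refine ⟨hnd, hVs, ?_⟩
      intro u hu
      induction hu with
      | zero => simpa using h0
      | step _ he ihr =>
        rcases hclosed _ _ ihr he with h | h
        · exact h
        · cases h
    | vertex :: rest =>
      by_cases hmem : vertex ∈ V
      · rw [loopA_succ_mem g fuel V vertex rest hmem]
        refine ih V rest hnd hVs (fun x hx => hQs x (List.mem_cons_of_mem _ hx)) ?_ ?_ ?_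
        · intro u v hu he
          rcases hclosed u v hu he with h | h
          · exact Or.inl h
          · rcases List.mem_cons.mp h with h | h
            · exact Or.inl (h ▸ hmem)
            · exact Or.inr h
        · rcases List.mem_append.mp h0 with h | h
          · exact List.mem_append.mpr (Or.inl h)
          · rcases List.mem_cons.mp h with h | h
            · exact List.mem_append.mpr (Or.inl (h ▸ hmem))
            · exact List.mem_append.mpr (Or.inr h)
        · simp only [List.length_cons] at hfuel
          omega
      · obtain ⟨u0, rfl, hru0⟩ := hQs vertex (List.mem_cons_self ..)
        have hu0n : u0 < g.length := reach_lt hpre hru0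
        rw [loopA_succ_new g fuel V _ rest hmem]
        set V' := V ++ [((u0 : Nat) : Int)] with hV'
        set row := pyRow g ((u0 : Nat) : Int) with hrowdef
        set batch := (List.range row.length).filterMap
          (fun v => if row.getD v 0 = 1 ∧ (v : Int) ∉ V' then some ((v : Int)) else none)
          with hbatch
        have hrowlt : ∀ v : Nat, row.getD v 0 = 1 → v < g.length := by
          intro v hv; exact edge_lt hpre (show EdgeG g u0 v from hv)
        have hbatchS : ∀ x ∈ batch, ∃ u : Nat, x = (u : Int) ∧ ReachG g u := by
          intro x hx
          rw [hbatch] at hx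
          simp only [List.mem_filterMap, List.mem_range] at hx
          obtain ⟨v, _, hsome⟩ := hx
          split at hsome
          · next hc =>
            cases hsome
            exact ⟨v, rfl, ReachG.step hru0 hc.1⟩
          · cases hsome
        have hcnt := countM_append_new g.length V u0 hu0n hmem
        have hblen : batch.length ≤ g.length := by
          rw [hbatch]; exact batch_len_le g row hrowlt V'
        have hnd' : V'.Nodup := by
          rw [hV']
          refine List.Nodup.append hnd (List.nodup_singleton _) ?_
          intro a ha hb
          rw [List.mem_singleton] at hb
          exact hmem (hb ▸ ha)
        have hVs' : ∀ x ∈ V', ∃ u : Nat, x = (u : Int) ∧ ReachG g u := by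
          intro x hx
          rcases List.mem_append.mp hx with h | h
          · exact hVs x h
          · rw [List.mem_singleton] at h
            exact ⟨u0, h, hru0⟩
        have hQs' : ∀ x ∈ rest ++ batch, ∃ u : Nat, x = (u : Int) ∧ ReachG g u := by
          intro x hx
          rcases List.mem_append.mp hx with h | h
          · exact hQs x (List.mem_cons_of_mem _ h)
          · exact hbatchS x h
        have hclosed' : ∀ u v : Nat, (u : Int) ∈ V' → EdgeG g u v →
            (v : Int) ∈ V' ∨ (v : Int) ∈ rest ++ batch := by
          intro u v hu he
          rcases List.mem_append.mp hu with hu | hu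
          · rcases hclosed u v hu he with h | h
            · exact Or.inl (List.mem_append.mpr (Or.inl h))
            · rcases List.mem_cons.mp h with h | h
              · exact Or.inl (h ▸ List.mem_append.mpr (Or.inr (List.mem_singleton.mpr rfl)))
              · exact Or.inr (List.mem_append.mpr (Or.inl h))
          · rw [List.mem_singleton] at hu
            have huu : u = u0 := by exact_mod_cast hu
            subst huu
            by_cases hv : (v : Int) ∈ V'
            · exact Or.inl hv
            · refine Or.inr (List.mem_append.mpr (Or.inr ?_))
              rw [hbatch]
              simp only [List.mem_filterMap, List.mem_range]
              refine ⟨v, ?_, ?_⟩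
              · have he2 : row.getD v 0 = 1 := he
                by_contra hc
                rw [List.getD_eq_default _ _ (by omega)] at he2
                exact absurd he2 (by norm_num)
              · have he2 : row.getD v 0 = 1 := he
                rw [if_pos ⟨he2, hv⟩]
        have h0' : (0 : Int) ∈ V' ++ (rest ++ batch) := by
          rcases List.mem_append.mp h0 with h | h
          · exact List.mem_append.mpr (Or.inl (List.mem_append.mpr (Or.inl h)))
          · rcases List.mem_cons.mp h with h | h
            · refine List.mem_append.mpr (Or.inl (List.mem_append.mpr (Or.inr ?_)))
              rw [List.mem_singleton]
              exact h
            · exact List.mem_append.mpr (Or.inr (List.mem_append.mpr (Or.inl h)))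
        have hfuel' : countM g.length V' * (g.length + 1) + (rest ++ batch).length ≤ fuel := by
          simp only [List.length_append, List.length_cons] at hfuel ⊢
          have h1 : countM g.length V' + 1 = countM g.length V := hcnt
          have h2 : countM g.length V * (g.length + 1)
              = countM g.length V' * (g.length + 1) + (g.length + 1) := by
            rw [← h1]; ring
          rw [h2] at hfuel
          linarith [hblen]
        exact ih V' (rest ++ batch) hnd' hVs' hQs' hclosed' h0' hfuel'

-- ---------- B side ----------

-- reached[v] as a proposition
def RtL (r : List Bool) (v : Nat) : Prop := r.getD v false = true

lemma RtL_lt {r : List Bool} {v : Nat} (h : RtL r v) : v < r.length := by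
  by_contra hc
  unfold RtL at h
  rw [List.getD_eq_default _ _ (by omega)] at h
  exact absurd h (by norm_num)

lemma RtL_set_true {r : List Bool} {v w : Nat} (hv : v < r.length) (h : RtL r w ∨ w = v) :
    RtL (r.set v true) w := by
  rcases h with h | rfl
  · have hw := RtL_lt h
    unfold RtL at h ⊢
    by_cases hwv : w = v
    · subst hwv
      rw [List.getD_eq_getElem _ _ (by simpa using hw),
        List.getElem_set_self (by simpa using hv)]
    · rw [List.getD_eq_getElem _ _ (by simpa using hw),
        List.getElem_set_ne (by omega)]
      rw [List.getD_eq_getElem _ _ hw] at h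
      exact h
  · unfold RtL
    rw [List.getD_eq_getElem _ _ (by simpa using hv),
      List.getElem_set_self (by simpa using hv)]

lemma count_true_set {r : List Bool} {v : Nat} (hv : v < r.length)
    (hfalse : r.getD v false = false) :
    (r.set v true).count true = r.count true + 1 := by
  rw [List.count_set hv]
  rw [List.getD_eq_getElem _ _ hv] at hfalse
  simp [hfalse]

-- invariants of the inner fold over an arbitrary index list
lemma fold_stepB_inv (row : List Int) :
    ∀ (l : List Nat) (st : List Bool × Bool),
      ((l.foldl (stepB row) st).1.length = st.1.length) ∧
      (∀ w, RtL st.1 w → RtL (l.foldl (stepB row) st).1 w) ∧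
      (st.2 = true → (l.foldl (stepB row) st).2 = true) ∧
      (st.1.count true ≤ (l.foldl (stepB row) st).1.count true) := by
  intro l
  induction l with
  | nil => exact fun st => ⟨rfl, fun _ h => h, fun h => h, le_refl _⟩
  | cons v l ih =>
    intro st
    simp only [List.foldl_cons]
    by_cases h : row.getD v 0 = 1 ∧ st.1.getD v false = false
    · have hstep : stepB row st v = (st.1.set v true, true) := by unfold stepB; rw [if_pos h]
      rw [hstep]
      obtain ⟨ih1, ih2, ih3, ih4⟩ := ih (st.1.set v true, true)
      by_cases hv : v < st.1.length
      · refine ⟨by simpa using ih1, ?_, fun _ => ih3 rfl, ?_⟩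
        · intro w hw
          exact ih2 w (RtL_set_true hv (Or.inl hw))
        · calc st.1.count true ≤ (st.1.set v true).count true := by
                rw [count_true_set hv h.2]; omega
            _ ≤ _ := ih4
      · have hset : st.1.set v true = st.1 := List.set_eq_of_length_le (by omega)
        rw [hset] at ih1 ih2 ih3 ih4 ⊢
        exact ⟨ih1, ih2, fun _ => ih3 rfl, ih4⟩
    · have hstep : stepB row st v = st := by simp only [stepB, if_neg h]
      rw [hstep]
      exact ih st
  
lemma fold_stepB_sound {g : List (List Int)} {u0 : Nat} (hru0 : ReachG g u0) :
    ∀ (l : List Nat) (st : List Bool × Bool),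
      (∀ w, RtL st.1 w → ReachG g w) →
      (∀ w, RtL (l.foldl (stepB (pyRow g (u0 : Int))) st).1 w → ReachG g w) := by
  intro l
  induction l with
  | nil => exact fun st h => h
  | cons v l ih =>
    intro st hs
    simp only [List.foldl_cons]
    by_cases h : (pyRow g (u0 : Int)).getD v 0 = 1 ∧ st.1.getD v false = false
    · have hstep : stepB (pyRow g (u0 : Int)) st v = (st.1.set v true, true) := by
        unfold stepB; rw [if_pos h]
      rw [hstep]
      refine ih _ ?_
      intro w hw
      by_cases hwv : w = v
      · exact hwv ▸ ReachG.step hru0 h.1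
      · refine hs w ?_
        have hw2 : (st.1.set v true).getD w false = true := hw
        have hwl : w < st.1.length := by
          have := RtL_lt hw2
          simpa using this
        unfold RtL
        rw [List.getD_eq_getElem _ _ (by simpa using hwl),
          List.getElem_set_ne (by omega)] at hw2
        rw [List.getD_eq_getElem _ _ hwl]
        exact hw2
    · have hstep : stepB (pyRow g (u0 : Int)) st v = st := by
        simp only [stepB, if_neg h]
      rw [hstep]
      exact ih st hs

lemma fold_stepB_quiet (row : List Int) :
    ∀ (l : List Nat) (st : List Bool × Bool),
      (l.foldl (stepB row) st).2 = false →
      (l.foldl (stepB row) st).1 = st.1 ∧ st.2 = false ∧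
        (∀ v ∈ l, row.getD v 0 = 1 → RtL st.1 v) := by
  intro l
  induction l with
  | nil => exact fun st h => ⟨rfl, h, by simp⟩
  | cons v l ih =>
    intro st hq
    simp only [List.foldl_cons] at hq ⊢
    by_cases h : row.getD v 0 = 1 ∧ st.1.getD v false = false
    · have hstep : stepB row st v = (st.1.set v true, true) := by unfold stepB; rw [if_pos h]
      rw [hstep] at hq
      have := (fold_stepB_inv row l (st.1.set v true, true)).2.2.1 rfl
      rw [hq] at this
      exact absurd this (by norm_num)
    · have hstep : stepB row st v = st := by simp only [stepB, if_neg h]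
      rw [hstep] at hq ⊢
      obtain ⟨h1, h2, h3⟩ := ih st hq
      refine ⟨h1, h2, ?_⟩
      intro w hw hrow
      rcases List.mem_cons.mp hw with rfl | hw
      · unfold RtL
        cases hgv : st.1.getD w false with
        | false => exact absurd ⟨hrow, hgv⟩ h
        | true => rfl
      · exact h3 w hw hrow

-- the outer sweep body
def outerStep (g : List (List Int)) (st : List Bool × Bool) (u : Nat) : List Bool × Bool :=
  if st.1.getD u false then rowLoop (pyRow g (u : Int)) st else st

lemma roundB_eq_foldl (g : List (List Int)) (n : Nat) (r : List Bool) :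
    roundB g n r = (List.range n).foldl (outerStep g) (r, false) := by
  unfold roundB outerStep
  rfl

-- length / monotonicity / flag / count invariants of the outer fold, any start state
lemma fold_outer_inv (g : List (List Int)) :
    ∀ (l : List Nat) (r : List Bool) (b : Bool),
      ((l.foldl (outerStep g) (r, b)).1.length = r.length) ∧
      (∀ w, RtL r w → RtL (l.foldl (outerStep g) (r, b)).1 w) ∧
      (r.count true ≤ (l.foldl (outerStep g) (r, b)).1.count true) ∧
      (b = true → (l.foldl (outerStep g) (r, b)).2 = true) := by
  intro l
  induction l with
  | nil => exact fun r b => ⟨rfl, fun _ h => h, le_refl _, fun h => h⟩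
  | cons u l ih =>
    intro r b
    simp only [List.foldl_cons]
    by_cases h : r.getD u false
    · have hstep : outerStep g (r, b) u = rowLoop (pyRow g (u : Int)) (r, b) := by
        unfold outerStep; rw [if_pos h]
      rw [hstep]
      obtain ⟨i1, i2, i3, i4⟩ := fold_stepB_inv (pyRow g (u : Int))
        (List.range (pyRow g (u : Int)).length) (r, b)
      have hrl : rowLoop (pyRow g (u : Int)) (r, b)
          = (List.range (pyRow g (u : Int)).length).foldl (stepB (pyRow g (u : Int))) (r, b) := rfl
      set st' := rowLoop (pyRow g (u : Int)) (r, b) with hst'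
      rw [← hrl] at i1 i2 i4
      obtain ⟨j1, j2, j3, j4⟩ := ih st'.1 st'.2
      refine ⟨by rw [j1, i1], ?_, ?_, ?_⟩
      · intro w hw
        exact j2 w (i2 w hw)
      · exact le_trans i4 j3
      · intro hb
        exact j4 (i3 hb)
    · have hstep : outerStep g (r, b) u = (r, b) := by
        simp only [outerStep]
        rw [if_neg (by simpa using h)]
      rw [hstep]
      exact ih r b

lemma fold_outer_sound {g : List (List Int)} :
    ∀ (l : List Nat) (r : List Bool) (b : Bool),
      (∀ w, RtL r w → ReachG g w) →
      (∀ w, RtL (l.foldl (outerStep g) (r, b)).1 w → ReachG g w) := by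
  intro l
  induction l with
  | nil => exact fun r b h => h
  | cons u l ih
    =>
    intro r b hs
    simp only [List.foldl_cons]
    by_cases h : r.getD u false
    · have hstep : outerStep g (r, b) u = rowLoop (pyRow g (u : Int)) (r, b) := by
        unfold outerStep; rw [if_pos h]
      rw [hstep]
      have hru : ReachG g u := hs u h
      have hsound := fold_stepB_sound hru (List.range (pyRow g (u : Int)).length) (r, b) hs
      have hrl : rowLoop (pyRow g (u : Int)) (r, b)
          = (List.range (pyRow g (u : Int)).length).foldl (stepB (pyRow g (u : Int))) (r, b) := rfl
      rw [← hrl] at hsound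
      have := ih (rowLoop (pyRow g (u : Int)) (r, b)).1 (rowLoop (pyRow g (u : Int)) (r, b)).2 hsound
      simpa using this
    · have hstep : outerStep g (r, b) u = (r, b) := by
        simp only [outerStep]
        rw [if_neg (by simpa using h)]
      rw [hstep]
      exact ih r b hs

-- a quiet round leaves the array unchanged and certifies closure under the swept edges
lemma fold_outer_quiet {g : List (List Int)} :
    ∀ (l : List Nat) (r : List Bool) (b : Bool),
      (l.foldl (outerStep g) (r, b)).2 = false →
      (l.foldl (outerStep g) (r, b)).1 = r ∧ b = false ∧
        (∀ u ∈ l, RtL r u → ∀ v : Nat, (pyRow g (u : Int)).getD v 0 = 1 → RtL r v) := by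
  intro l
  induction l with
  | nil => exact fun r b h => ⟨rfl, h, by simp⟩
  | cons u l ih =>
    intro r b hq
    simp only [List.foldl_cons] at hq ⊢
    by_cases h : r.getD u false
    · have hstep : outerStep g (r, b) u = rowLoop (pyRow g (u : Int)) (r, b) := by
        unfold outerStep; rw [if_pos h]
      rw [hstep] at hq ⊢
      set st' := rowLoop (pyRow g (u : Int)) (r, b) with hst'
      obtain ⟨j1, j2, j3⟩ := ih st'.1 st'.2 (by simpa using hq)
      have hq2 : st'.2 = false := j2
      have hrl : st' = (List.range (pyRow g (u : Int)).length).foldl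
          (stepB (pyRow g (u : Int))) (r, b) := hst'
      obtain ⟨k1, k2, k3⟩ := fold_stepB_quiet (pyRow g (u : Int))
        (List.range (pyRow g (u : Int)).length) (r, b) (by rw [← hrl]; exact hq2)
      have hst1 : st'.1 = r := by rw [hrl]; exact k1
      have j1' : (l.foldl (outerStep g) st').1 = st'.1 := j1
      rw [hst1] at j1'
      refine ⟨j1', k2, ?_⟩
      intro w hw hrw v hv
      rcases List.mem_cons.mp hw with rfl | hw
      · by_cases hvlen : v < (pyRow g (w : Int)).length
        · exact k3 v (List.mem_range.mpr hvlen) hv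
        · exfalso
          rw [List.getD_eq_default _ _ (by omega)] at hv
          exact absurd hv (by norm_num)
      · have := j3 w hw (by rwa [hst1])
        rw [hst1] at this
        exact this v hv
    · have hstep : outerStep g (r, b) u = (r, b) := by
        simp only [outerStep]
        rw [if_neg (by simpa using h)]
      rw [hstep] at hq ⊢
      obtain ⟨j1, j2, j3⟩ := ih r b hq
      refine ⟨j1, j2, ?_⟩
      intro w hw hrw v hv
      rcases List.mem_cons.mp hw with rfl | hw
      · exact absurd hrw (by simpa [RtL] using h)
      · exact j3 w hw hrw v hv

-- the inner fold strictly increases the number of reached vertices when it sets the flag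
lemma fold_stepB_strict (row : List Int) :
    ∀ (l : List Nat) (st : List Bool × Bool),
      (∀ v : Nat, row.getD v 0 = 1 → v < st.1.length) →
      st.2 = false → (l.foldl (stepB row) st).2 = true →
      st.1.count true < (l.foldl (stepB row) st).1.count true := by
  intro l
  induction l with
  | nil =>
    intro st _ hb hq
    simp only [List.foldl_nil] at hq
    rw [hq] at hb
    exact absurd hb (by norm_num)
  | cons v l ih =>
    intro st hlen hb hq
    simp only [List.foldl_cons] at hq ⊢
    by_cases h : row.getD v 0 = 1 ∧ st.1.getD v false = false
    · have hstep : stepB row st v = (st.1.set v true, true) := by unfold stepB; rw [if_pos h]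
      rw [hstep] at hq ⊢
      have hv : v < st.1.length := hlen v h.1
      have hcount : (st.1.set v true).count true = st.1.count true + 1 :=
        count_true_set hv h.2
      have h3 : (st.1.set v true).count true
          ≤ (l.foldl (stepB row) (st.1.set v true, true)).1.count true :=
        (fold_stepB_inv row l (st.1.set v true, true)).2.2.2
      omega
    · have hstep : stepB row st v = st := by simp only [stepB, if_neg h]
      rw [hstep] at hq ⊢
      exact ih st hlen hb hq

-- an outer sweep that sets the flag strictly increases the number of reached vertices
lemma fold_outer_strict {g : List (List Int)} (hpre : Pre_caminos_desde_todos g) :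
    ∀ (l : List Nat) (r : List Bool) (b : Bool),
      r.length = g.length →
      b = false → (l.foldl (outerStep g) (r, b)).2 = true →
      r.count true < (l.foldl (outerStep g) (r, b)).1.count true := by
  intro l
  induction l with
  | nil =>
    intro r b _ hb hq
    simp only [List.foldl_nil] at hq
    rw [hq] at hb
    exact absurd hb (by norm_num)
  | cons u l ih =>
    intro r b hrlen hb hq
    simp only [List.foldl_cons] at hq ⊢
    by_cases h : r.getD u false
    · have hstep : outerStep g (r, b) u = rowLoop (pyRow g (u : Int)) (r, b) := by
        unfold outerStep; rw [if_pos h]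
      rw [hstep] at hq ⊢
      have hrl : rowLoop (pyRow g (u : Int)) (r, b)
          = (List.range (pyRow g (u : Int)).length).foldl (stepB (pyRow g (u : Int))) (r, b) := rfl
      set st' := rowLoop (pyRow g (u : Int)) (r, b) with hst'
      obtain ⟨i1, _, _, i4⟩ := fold_stepB_inv (pyRow g (u : Int))
        (List.range (pyRow g (u : Int)).length) (r, b)
      rw [← hrl] at i1 i4
      cases hflag : st'.2 with
      | true =>
        have hstrict := fold_stepB_strict (pyRow g (u : Int))
          (List.range (pyRow g (u : Int)).length) (r, b)
          (by intro v hv; rw [hrlen]; exact edge_lt hpre (show EdgeG g u v from hv))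
          hb (by rw [← hrl]; exact hflag)
        rw [← hrl] at hstrict
        have hmono : st'.1.count true ≤ (l.foldl (outerStep g) st').1.count true :=
          (fold_outer_inv g l st'.1 st'.2).2.2.1
        have hstrict' : r.count true < st'.1.count true := hstrict
        omega
      | false =>
        obtain ⟨k1, _, _⟩ := fold_stepB_quiet (pyRow g (u : Int))
          (List.range (pyRow g (u : Int)).length) (r, b) (by rw [← hrl]; exact hflag)
        have hst1 : st'.1 = r := by rw [hrl]; exact k1
        have hq' : (l.foldl (outerStep g) (st'.1, st'.2)).2 = true := hq
        have hrec := ih st'.1 st'.2 (by rw [hst1]; exact hrlen) hflag hq'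
        have hgoal : st'.1.count true < (l.foldl (outerStep g) st').1.count true := hrec
        rw [hst1] at hgoal
        exact hgoal
    · have hstep : outerStep g (r, b) u = (r, b) := by
        simp only [outerStep]
        rw [if_neg (by simpa using h)]
      rw [hstep] at hq ⊢
      exact ih r b hrlen hb hq

-- the saturation loop computes exactly the set of reachable vertices
lemma loopB_char {g : List (List Int)} (hpre : Pre_caminos_desde_todos g) :
    ∀ (fuel : Nat) (r : List Bool),
      r.length = g.length →
      (∀ w, RtL r w → ReachG g w) →
      RtL r 0 →
      g.length - r.count true < fuel →
      ((loopB g g.length fuel r).length = g.length ∧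
       (∀ w, RtL (loopB g g.length fuel r) w ↔ ReachG g w)) := by
  intro fuel
  induction fuel with
  | zero => intro r _ _ _ hf; omega
  | succ fuel ih =>
    intro r hrlen hsound h0 hf
    have hstep : loopB g g.length (fuel + 1) r
        = if (roundB g g.length r).2 then loopB g g.length fuel (roundB g g.length r).1
          else (roundB g g.length r).1 := rfl
    obtain ⟨i1, i2, i3, _⟩ := fold_outer_inv g (List.range g.length) r false
    rw [← roundB_eq_foldl] at i1 i2 i3
    have hs2 : ∀ w, RtL (roundB g g.length r).1 w → ReachG g w := by
      have h := fold_outer_sound (List.range g.length) r false hsound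
      rw [← roundB_eq_foldl] at h
      exact h
    cases hflag : (roundB g g.length r).2 with
    | true =>
      rw [hstep, if_pos hflag]
      have hstrict := fold_outer_strict hpre (List.range g.length) r false hrlen rfl
        (by rw [← roundB_eq_foldl]; exact hflag)
      rw [← roundB_eq_foldl] at hstrict
      have hcle : (roundB g g.length r).1.count true ≤ (roundB g g.length r).1.length :=
        List.count_le_length
      rw [i1, hrlen] at hcle
      exact ih (roundB g g.length r).1 (by rw [i1, hrlen]) hs2 (i2 0 h0) (by omega)
    | false =>
      rw [hstep, if_neg (by rw [hflag]; exact Bool.false_ne_true)]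
      obtain ⟨k1, _, k3⟩ := fold_outer_quiet (List.range g.length) r false
        (by rw [← roundB_eq_foldl]; exact hflag)
      rw [← roundB_eq_foldl] at k1
      refine ⟨by rw [i1, hrlen], ?_⟩
      intro w
      constructor
      · intro hw
        exact hs2 w hw
      · intro hw
        rw [k1]
        induction hw with
        | zero => exact h0
        | step hu he ihr =>
          have hult := reach_lt hpre hu
          exact k3 _ (List.mem_range.mpr hult) ihr _ he

-- ---------- final assembly ----------

lemma rangeInts_nodup (n : Nat) : ((List.range n).map (fun v : Nat => (v : Int))).Nodup :=
  List.Nodup.map (fun a b h => by exact_mod_cast h) List.nodup_range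

lemma lenA_iff {g : List (List Int)} (hpre : Pre_caminos_desde_todos g)
    (R : List Int) (hnd : R.Nodup)
    (hs : ∀ x ∈ R, ∃ u : Nat, x = (u : Int) ∧ ReachG g u)
    (hc : ∀ u : Nat, ReachG g u → (u : Int) ∈ R) :
    (R.length = g.length ↔ ∀ v : Nat, v < g.length → ReachG g v) := by
  have hsub : R ⊆ (List.range g.length).map (fun v : Nat => (v : Int)) := by
    intro x hx
    obtain ⟨u, rfl, hru⟩ := hs x hx
    exact List.mem_map.mpr ⟨u, List.mem_range.mpr (reach_lt hpre hru), rfl⟩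
  have hsp : List.Subperm R ((List.range g.length).map (fun v : Nat => (v : Int))) :=
    List.subperm_of_subset hnd hsub
  constructor
  · intro hlen v hv
    have hperm : List.Perm R ((List.range g.length).map (fun v : Nat => (v : Int))) :=
      hsp.perm_of_length_le (by simp [hlen])
    have hvmem : (v : Int) ∈ R :=
      hperm.mem_iff.mpr (List.mem_map.mpr ⟨v, List.mem_range.mpr hv, rfl⟩)
    obtain ⟨u, hu, hru⟩ := hs _ hvmem
    have : v = u := by exact_mod_cast hu
    exact this ▸ hru
  · intro hall
    have hsub2 : (List.range g.length).map (fun v : Nat => (v : Int)) ⊆ R := by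
      intro x hx
      obtain ⟨v, hv, rfl⟩ := List.mem_map.mp hx
      exact hc v (hall v (List.mem_range.mp hv))
    have hsp2 := List.subperm_of_subset (rangeInts_nodup g.length) hsub2
    have h1 := hsp.length_le
    have h2 := hsp2.length_le
    simp only [List.length_map, List.length_range] at h1 h2
    omega

lemma all_iff {g : List (List Int)} (R : List Bool) (hlen : R.length = g.length)
    (hch : ∀ w, RtL R w ↔ ReachG g w) :
    (R.all id = true ↔ ∀ v : Nat, v < g.length → ReachG g v) := by
  rw [List.all_eq_true]
  constructor
  · intro h v hv
    refine (hch v).mp ?_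
    unfold RtL
    rw [List.getD_eq_getElem _ _ (by omega)]
    exact h _ (List.getElem_mem _)
  · intro h b hb
    obtain ⟨i, hi, rfl⟩ := List.mem_iff_getElem.mp hb
    have hrt : RtL R i := (hch i).mpr (h i (by omega))
    unfold RtL at hrt
    rw [List.getD_eq_getElem _ _ hi] at hrt
    exact hrt

-- ===== VERDICT (by name: the statement is the Claim_ definition above) =====
theorem caminos_desde_todos_spec : Claim_equal_caminos_desde_todos := by
  intro g _ hpre
  unfold Spec_caminos_desde_todos caminos_desde_todos caminos_desde_todos_alt
  have hn : 0 < g.length := List.length_pos_of_ne_nil hpre.1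
  -- A side
  obtain ⟨hand, has, hac⟩ := loopA_char hpre (g.length * (g.length + 1) + 1) [] [0]
    List.nodup_nil (by simp)
    (by intro x hx; rw [List.mem_singleton] at hx; exact ⟨0, by simpa using hx, ReachG.zero⟩)
    (by intro u v hu _; cases hu) (by simp)
    (by rw [countM_nil]; simp)
  have hA := lenA_iff hpre _ hand has hac
  -- B side
  set r0 := (List.replicate g.length false).set 0 true with hr0
  have hr0len : r0.length = g.length := by simp [hr0]
  have hr00 : RtL r0 0 := by
    unfold RtL
    rw [hr0, List.getD_eq_getElem _ _ (by simpa using hn)]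
    rw [List.getElem_set_self (by simpa using hn)]
  have hr0sound : ∀ w, RtL r0 w → ReachG g w := by
    intro w hw
    by_cases hw0 : w = 0
    · exact hw0 ▸ ReachG.zero
    · exfalso
      have hwl := RtL_lt hw
      unfold RtL at hw
      rw [hr0len] at hwl
      rw [hr0, List.getD_eq_getElem _ _ (by simpa using hwl),
        List.getElem_set_ne (by omega)] at hw
      simp at hw
  have hr0count : 0 < r0.count true := by
    have : (true : Bool) ∈ r0 := by
      have := hr00
      unfold RtL at this
      rw [List.getD_eq_getElem _ _ (by rw [hr0len]; exact hn)] at this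
      rw [← this]
      exact List.getElem_mem _
    exact List.count_pos_iff.mpr this
  obtain ⟨hblen, hbch⟩ := loopB_char hpre g.length r0 hr0len hr0sound hr00 (by omega)
  have hB := all_iff _ hblen hbch
  -- combine
  rw [Bool.eq_iff_iff]
  rw [beq_iff_eq]
  rw [hA, hB]
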